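-- pv_equiv track=rewrite | github.com/mufeedali/Wordbook | reo/reo_base.py | clean_pango
-- ===== SOURCE A (Python) =====
-- def clean_pango(data):
--     """Convert HTML subset to Pango markup. Not a real converter."""
--     replace_list = {
--         '<font color="': '<span foreground="',
--         '</font>': '</span>',
--         '<br>': '\n',
--     }
--     for to_replace, replace_with in replace_list.items():
--         data = data.replace(to_replace, replace_with)
--     return data
-- ===== SOURCE B (Python) =====
-- _PANGO_SUBS = (
--     ('<font color="', '<span foreground="'),
--     ('</font>', '</span>'),
--     ('<br>', '\n'),
-- )
--
--
-- def clean_pango(data):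
--     """Convert HTML subset to Pango markup. Not a real converter."""
--     out = []
--     i = 0
--     n = len(data)
--     while i < n:
--         ch = data[i]
--         if ch == '<':
--             for pat, rep in _PANGO_SUBS:
--                 if data.startswith(pat, i):
--                     out.append(rep)
--                     i += len(pat)
--                     break
--             else:
--                 out.append(ch)
--                 i += 1
--         else:
--             out.append(ch)
--             i += 1
--     return ''.join(out)
-- ===== Notes on version B (the rewrite author's own statement) =====
-- stated objective: alternative
-- what changed: Replaces A's three full-string replace passes by a single left-to-right scan that matches the three source patterns inline and emits replacements into an output buffer in one pass.
import Mathlib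
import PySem

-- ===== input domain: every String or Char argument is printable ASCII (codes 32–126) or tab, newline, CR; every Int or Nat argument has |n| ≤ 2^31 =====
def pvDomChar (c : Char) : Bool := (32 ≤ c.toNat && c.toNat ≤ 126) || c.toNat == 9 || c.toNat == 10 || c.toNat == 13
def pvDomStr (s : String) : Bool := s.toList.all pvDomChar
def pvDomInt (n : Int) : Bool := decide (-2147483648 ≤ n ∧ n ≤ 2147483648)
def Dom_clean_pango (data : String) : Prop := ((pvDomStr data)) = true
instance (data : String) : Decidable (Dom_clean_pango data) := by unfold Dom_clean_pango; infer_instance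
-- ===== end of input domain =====

-- B replaces A's three sequential full-string replace passes by one left-to-right scan that
-- matches the three patterns inline and emits replacements into an output buffer ("alternative";
-- same asymptotic cost, a single pass instead of three).

-- ===== PORT A =====
def clean_pango (data : String) : String :=
  let replace_list : PySem.Dict String String :=
    ((PySem.Dict.empty.insert "<font color=\"" "<span foreground=\"").insert
        "</font>" "</span>").insert "<br>" "\n"
  replace_list.items.foldl (fun d kv => PySem.Str.replace d kv.1 kv.2) data

-- ===== PORT B =====
-- B-side pattern/replacement constants (the entries of B's replace_list, as char lists)
def pvP1 : List Char := "<font color=\"".toList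
def pvR1 : List Char := "<span foreground=\"".toList
def pvP2 : List Char := "</font>".toList
def pvR2 : List Char := "</span>".toList
def pvP3 : List Char := "<br>".toList
def pvR3 : List Char := "\n".toList

-- B's single left-to-right scan: at each position, if the char is '<' try the three
-- patterns in dict order; on a match emit the replacement and skip the pattern,
-- otherwise emit the char and advance by one.
def pvScan : List Char → List Char
  | [] => []
  | c :: t =>
    if c = '<' then
      if pvP1.isPrefixOf (c :: t) then pvR1 ++ pvScan ((c :: t).drop pvP1.length)
      else if pvP2.isPrefixOf (c :: t) then pvR2 ++ pvScan ((c :: t).drop pvP2.length)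
      else if pvP3.isPrefixOf (c :: t) then pvR3 ++ pvScan ((c :: t).drop pvP3.length)
      else c :: pvScan t
    else c :: pvScan t
  termination_by l => l.length
  decreasing_by all_goals simp_all [pvP1, pvP2, pvP3]

def clean_pango_alt (data : String) : String :=
  String.ofList (pvScan data.toList)

-- ===== PRECONDITION & SPEC =====
def Spec_clean_pango (data : String) (out : String) : Prop := out = clean_pango_alt data
instance (data : String) (out : String) : Decidable (Spec_clean_pango data out) := by unfold Spec_clean_pango; infer_instance

-- ===== CLAIM (what is proved, stated in full; the proofs are below) =====
def Claim_equal_clean_pango : Prop := ∀ (data : String), Dom_clean_pango data → Spec_clean_pango data (clean_pango data)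

-- ===== LEMMAS AND PROOFS =====

-- Proof-side model of one Python str.replace pass (PySem.Chars.replace without fuel/accumulator).
def pvRep (p r : List Char) : List Char → List Char
  | [] => []
  | c :: t =>
    if _h : p.isPrefixOf (c :: t) ∧ p ≠ [] then r ++ pvRep p r ((c :: t).drop p.length)
    else c :: pvRep p r t
  termination_by l => l.length
  decreasing_by
    · simp only [List.length_drop, List.length_cons]
      have : 1 ≤ p.length := List.length_pos_of_ne_nil _h.2
      omega
    · simp

theorem pvRep_nil (p r : List Char) : pvRep p r [] = [] := by simp [pvRep]

theorem pvRep_cons (p r : List Char) (c : Char) (t : List Char) :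
    pvRep p r (c :: t) =
      if p.isPrefixOf (c :: t) ∧ p ≠ [] then r ++ pvRep p r ((c :: t).drop p.length)
      else c :: pvRep p r t := by
  rw [pvRep]; split_ifs with h <;> rfl

-- go with enough fuel computes pvRep
theorem pvGo_eq (p r : List Char) (hp : p ≠ []) :
    ∀ fuel l acc, l.length ≤ fuel →
      PySem.Chars.replace.go p r fuel l acc = acc.reverse ++ pvRep p r l := by
  intro fuel
  induction fuel with
  | zero =>
      intro l acc hl
      have : l = [] := List.eq_nil_of_length_eq_zero (Nat.le_zero.mp hl)
      subst this
      simp [PySem.Chars.replace.go, pvRep_nil]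
  | succ n ih =>
      intro l acc hl
      cases l with
      | nil => simp [PySem.Chars.replace.go, pvRep_nil]
      | cons c t =>
          rw [PySem.Chars.replace.go]
          by_cases h : p.isPrefixOf (c :: t)
          · rw [if_pos h]
            have hlen : ((c :: t).drop p.length).length ≤ n := by
              have : 1 ≤ p.length := List.length_pos_of_ne_nil hp
              simp only [List.length_drop, List.length_cons]
              simp only [List.length_cons] at hl
              omega
            rw [ih _ _ hlen, pvRep_cons, if_pos ⟨h, hp⟩]
            simp
          · rw [if_neg h]
            have hlen : t.length ≤ n := by
              simp only [List.length_cons] at hl; omega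
            rw [ih _ _ hlen, pvRep_cons, if_neg (by simp [h])]
            simp

-- one Chars.replace pass equals pvRep (for a nonempty pattern)
theorem pvStr_replace_toList (s p r : String) (hp : p.toList ≠ []) :
    (PySem.Str.replace s p r).toList = pvRep p.toList r.toList s.toList := by
  have hne : p.toList.isEmpty = false := by
    cases h : p.toList with
    | nil => exact absurd h hp
    | cons a l => simp
  simp only [PySem.Str.replace, PySem.Chars.replace, hne, Bool.false_eq_true, if_false,
    String.toList_ofList]
  rw [pvGo_eq p.toList r.toList hp _ s.toList [] (by simp)]
  simp

-- "every match of p starting inside a is already refuted inside a"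
abbrev pvBlox (p a : List Char) : Prop :=
  ∀ i < a.length, ∃ j < p.length, i + j < a.length ∧ p[j]? ≠ a[i + j]?

theorem pvBlox_not_prefix {p a : List Char} (h : pvBlox p a) (ha : a ≠ []) (b : List Char) :
    ¬ p <+: (a ++ b) := by
  intro hpre
  obtain ⟨j, hj, hja, hne⟩ := h 0 (by cases a with | nil => exact absurd rfl ha | cons x l => simp)
  simp only [Nat.zero_add] at hja hne
  obtain ⟨u, hu⟩ := hpre
  apply hne
  have h1 : (a ++ b)[j]? = p[j]? := by rw [← hu]; exact List.getElem?_append_left hj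
  have h2 : (a ++ b)[j]? = a[j]? := List.getElem?_append_left hja
  exact h1.symm.trans h2

theorem pvBlox_tail {p : List Char} {c : Char} {a : List Char} (h : pvBlox p (c :: a)) :
    pvBlox p a := by
  intro i hi
  obtain ⟨j, hj, hja, hne⟩ := h (i + 1) (by simp; omega)
  refine ⟨j, hj, by simp at hja; omega, ?_⟩
  have : (i + 1) + j = (i + j) + 1 := by omega
  rw [this] at hne
  simpa using hne

theorem pvRep_append {p : List Char} (r : List Char) {a : List Char} (b : List Char)
    (h : pvBlox p a) : pvRep p r (a ++ b) = a ++ pvRep p r b := by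
  induction a with
  | nil => simp
  | cons c a' ih =>
      have hnp : ¬ p.isPrefixOf ((c :: a') ++ b) := by
        rw [List.isPrefixOf_iff_prefix]
        exact pvBlox_not_prefix h (by simp) b
      rw [List.cons_append, pvRep_cons, if_neg (by simp [List.cons_append] at hnp ⊢; tauto)]
      rw [ih (pvBlox_tail h)]
      simp

theorem pvRep_no_new (p r : List Char) (hr : r[0]? = some '<') :
    ∀ t s, (∀ c ∈ s, c ≠ '<') → s <+: pvRep p r t → s <+: t := by
  intro t
  induction t with
  | nil =>
      intro s hs hp
      rw [pvRep_nil] at hp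
      exact hp
  | cons c t' ih =>
      intro s hs hp
      rw [pvRep_cons] at hp
      split_ifs at hp with h
      · cases s with
        | nil => exact List.nil_prefix
        | cons d s' =>
            exfalso
            obtain ⟨u, hu⟩ := hp
            have h0 : r ≠ [] := by intro h'; rw [h'] at hr; simp at hr
            have hrlen : 0 < r.length := List.length_pos_of_ne_nil h0
            have hh : ((d :: s') ++ u)[0]? = (r ++ pvRep p r ((c :: t').drop p.length))[0]? := by
              rw [hu]
            rw [List.getElem?_append_left (by simp), List.getElem?_append_left hrlen, hr] at hh
            simp at hh
            exact hs d (by simp) hh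
      · cases s with
        | nil => exact List.nil_prefix
        | cons d s' =>
            obtain ⟨u, hu⟩ := hp
            simp only [List.cons_append, List.cons.injEq] at hu
            obtain ⟨rfl, hu2⟩ := hu
            have hpre : s' <+: t' := ih s' (fun x hx => hs x (by simp [hx])) ⟨u, hu2⟩
            exact List.cons_prefix_cons.mpr ⟨rfl, hpre⟩

-- the first two passes fused into one scan (proof-side helper)
def pvScan12 : List Char → List Char
  | [] => []
  | c :: t =>
    if pvP1.isPrefixOf (c :: t) then pvR1 ++ pvScan12 ((c :: t).drop pvP1.length)
    else if pvP2.isPrefixOf (c :: t) then pvR2 ++ pvScan12 ((c :: t).drop pvP2.length)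
    else c :: pvScan12 t
  termination_by l => l.length
  decreasing_by all_goals simp [pvP1, pvP2]

theorem pvScan12_cons (c : Char) (t : List Char) :
    pvScan12 (c :: t) =
      if pvP1.isPrefixOf (c :: t) then pvR1 ++ pvScan12 ((c :: t).drop pvP1.length)
      else if pvP2.isPrefixOf (c :: t) then pvR2 ++ pvScan12 ((c :: t).drop pvP2.length)
      else c :: pvScan12 t := by
  rw [pvScan12]

theorem pvScan12_append {a : List Char} (b : List Char)
    (h1 : pvBlox pvP1 a) (h2 : pvBlox pvP2 a) :
    pvScan12 (a ++ b) = a ++ pvScan12 b := by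
  induction a with
  | nil => simp
  | cons c a' ih =>
      have hn1 : ¬ pvP1.isPrefixOf ((c :: a') ++ b) := by
        rw [List.isPrefixOf_iff_prefix]
        exact pvBlox_not_prefix h1 (by simp) b
      have hn2 : ¬ pvP2.isPrefixOf ((c :: a') ++ b) := by
        rw [List.isPrefixOf_iff_prefix]
        exact pvBlox_not_prefix h2 (by simp) b
      rw [List.cons_append, pvScan12_cons, if_neg (by rw [List.cons_append] at hn1; exact hn1),
        if_neg (by rw [List.cons_append] at hn2; exact hn2),
        ih (pvBlox_tail h1) (pvBlox_tail h2)]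
      simp

theorem pvScan12_no_new :
    ∀ t s, (∀ c ∈ s, c ≠ '<') → s <+: pvScan12 t → s <+: t := by
  intro t
  induction t using pvScan12.induct with
  | case1 =>
      intro s hs hp
      rw [show pvScan12 [] = [] from by rw [pvScan12]] at hp
      exact hp
  | case2 c t h ih =>
      intro s hs hp
      rw [pvScan12_cons, if_pos h] at hp
      cases s with
      | nil => exact List.nil_prefix
      | cons d s' =>
          exfalso
          obtain ⟨u, hu⟩ := hp
          have hh : ((d :: s') ++ u)[0]? = (pvR1 ++ pvScan12 ((c :: t).drop pvP1.length))[0]? := by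
            rw [hu]
          rw [List.getElem?_append_left (by simp), List.getElem?_append_left (by simp [pvR1])] at hh
          simp [pvR1] at hh
          exact hs d (by simp) hh
  | case3 c t h h2 ih =>
      intro s hs hp
      rw [pvScan12_cons, if_neg h, if_pos h2] at hp
      cases s with
      | nil => exact List.nil_prefix
      | cons d s' =>
          exfalso
          obtain ⟨u, hu⟩ := hp
          have hh : ((d :: s') ++ u)[0]? = (pvR2 ++ pvScan12 ((c :: t).drop pvP2.length))[0]? := by
            rw [hu]
          rw [List.getElem?_append_left (by simp), List.getElem?_append_left (by simp [pvR2])] at hh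
          simp [pvR2] at hh
          exact hs d (by simp) hh
  | case4 c t h h2 ih =>
      intro s hs hp
      rw [pvScan12_cons, if_neg h, if_neg h2] at hp
      cases s with
      | nil => exact List.nil_prefix
      | cons d s' =>
          obtain ⟨u, hu⟩ := hp
          simp only [List.cons_append, List.cons.injEq] at hu
          obtain ⟨rfl, hu2⟩ := hu
          have hpre : s' <+: t := ih s' (fun x hx => hs x (by simp [hx])) ⟨u, hu2⟩
          exact List.cons_prefix_cons.mpr ⟨rfl, hpre⟩

theorem pvRep_match (p r : List Char) (hp : p ≠ []) (u : List Char) :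
    pvRep p r (p ++ u) = r ++ pvRep p r u := by
  cases p with
  | nil => exact absurd rfl hp
  | cons a p' =>
      rw [List.cons_append, pvRep_cons,
        if_pos ⟨by rw [List.isPrefixOf_iff_prefix, ← List.cons_append]; exact List.prefix_append _ _, hp⟩]
      rw [← List.cons_append, List.drop_left]

def pvQ2 : List Char := "/font>".toList
def pvQ3 : List Char := "br>".toList

theorem pvP2_eq : pvP2 = '<' :: pvQ2 := by decide
theorem pvP3_eq : pvP3 = '<' :: pvQ3 := by decide

set_option maxRecDepth 8192 in
theorem pvFuse12 : ∀ n, ∀ l : List Char, l.length ≤ n →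
    pvRep pvP2 pvR2 (pvRep pvP1 pvR1 l) = pvScan12 l := by
  intro n
  induction n with
  | zero =>
      intro l hl
      have : l = [] := List.eq_nil_of_length_eq_zero (Nat.le_zero.mp hl)
      subst this
      rw [pvRep_nil, pvRep_nil, pvScan12]
  | succ n ih =>
      intro l hl
      cases l with
      | nil => rw [pvRep_nil, pvRep_nil, pvScan12]
      | cons c t =>
          by_cases h1 : pvP1.isPrefixOf (c :: t)
          · obtain ⟨u, hu⟩ := List.isPrefixOf_iff_prefix.mp h1
            have e1 : pvRep pvP1 pvR1 (c :: t) = pvR1 ++ pvRep pvP1 pvR1 u := by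
              rw [← hu, pvRep_match pvP1 pvR1 (by decide)]
            have hd : (c :: t).drop pvP1.length = u := by rw [← hu, List.drop_left]
            rw [e1, pvRep_append pvR2 _ (by decide),
              ih u (by have := congrArg List.length hu; simp [pvP1] at this; simp at hl; omega),
              pvScan12_cons, if_pos h1, hd]
          · by_cases h2 : pvP2.isPrefixOf (c :: t)
            · obtain ⟨u, hu⟩ := List.isPrefixOf_iff_prefix.mp h2
              rw [pvP2_eq, List.cons_append] at hu
              have hc : c = '<' := by
                have := congrArg (fun l => l[0]?) hu
                simpa using this.symm
              subst hc
              have ht : pvQ2 ++ u = t := by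
                have := congrArg List.tail hu
                simpa using this
              subst ht
              have hlu : u.length ≤ n := by simp at hl; omega
              rw [pvRep_cons, if_neg (by simp [h1]), pvRep_append pvR1 _ (by decide)]
              rw [show ('<' :: (pvQ2 ++ pvRep pvP1 pvR1 u)) = pvP2 ++ pvRep pvP1 pvR1 u from by
                    rw [pvP2_eq]; simp,
                pvRep_match pvP2 pvR2 (by decide) _, ih u hlu,
                pvScan12_cons, if_neg h1, if_pos h2]
              rw [show ('<' :: (pvQ2 ++ u)).drop pvP2.length = u from by
                    rw [pvP2_eq, List.length_cons, List.drop_succ_cons, List.drop_left]]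
            · rw [pvRep_cons pvP1 pvR1 c t, if_neg (by simp [h1])]
              have hg : ¬ pvP2.isPrefixOf (c :: pvRep pvP1 pvR1 t) := by
                intro hpf
                obtain ⟨u, hu⟩ := List.isPrefixOf_iff_prefix.mp hpf
                rw [pvP2_eq, List.cons_append] at hu
                have hc : c = '<' := by
                  have := congrArg (fun l => l[0]?) hu
                  simpa using this.symm
                have hpre : pvQ2 <+: pvRep pvP1 pvR1 t := by
                  refine ⟨u, ?_⟩
                  have := congrArg List.tail hu
                  simpa using this
                have h3 := pvRep_no_new pvP1 pvR1 (by decide) t _ (by simp [pvQ2]) hpre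
                apply h2
                rw [List.isPrefixOf_iff_prefix]
                obtain ⟨v, hv⟩ := h3
                refine ⟨v, ?_⟩
                rw [pvP2_eq, List.cons_append, hv, hc]
              rw [pvRep_cons, if_neg (by simp [hg]), ih t (by simp at hl; omega),
                pvScan12_cons, if_neg h1, if_neg h2]

def pvQ1 : List Char := "font color=\"".toList

theorem pvP1_eq : pvP1 = '<' :: pvQ1 := by decide

theorem pvScan_cons (c : Char) (t : List Char) :
    pvScan (c :: t) =
      if c = '<' then
        if pvP1.isPrefixOf (c :: t) then pvR1 ++ pvScan ((c :: t).drop pvP1.length)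
        else if pvP2.isPrefixOf (c :: t) then pvR2 ++ pvScan ((c :: t).drop pvP2.length)
        else if pvP3.isPrefixOf (c :: t) then pvR3 ++ pvScan ((c :: t).drop pvP3.length)
        else c :: pvScan t
      else c :: pvScan t := by
  rw [pvScan]

set_option maxRecDepth 8192 in
theorem pvFuse3 : ∀ n, ∀ l : List Char, l.length ≤ n →
    pvRep pvP3 pvR3 (pvScan12 l) = pvScan l := by
  intro n
  induction n with
  | zero =>
      intro l hl
      have : l = [] := List.eq_nil_of_length_eq_zero (Nat.le_zero.mp hl)
      subst this
      rw [pvScan12, pvScan, pvRep_nil]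
  | succ n ih =>
      intro l hl
      cases l with
      | nil => rw [pvScan12, pvScan, pvRep_nil]
      | cons c t =>
          by_cases hc : c = '<'
          · subst hc
            by_cases h1 : pvP1.isPrefixOf ('<' :: t)
            · obtain ⟨u, hu⟩ := List.isPrefixOf_iff_prefix.mp h1
              have e1 : pvScan12 ('<' :: t) = pvR1 ++ pvScan12 u := by
                rw [pvScan12_cons, if_pos h1, ← hu, List.drop_left]
              have hd : ('<' :: t).drop pvP1.length = u := by rw [← hu, List.drop_left]
              rw [e1, pvRep_append pvR3 _ (by decide),
                ih u (by have := congrArg List.length hu; simp [pvP1] at this; simp at hl; omega),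
                pvScan_cons, if_pos rfl, if_pos h1, hd]
            · by_cases h2 : pvP2.isPrefixOf ('<' :: t)
              · obtain ⟨u, hu⟩ := List.isPrefixOf_iff_prefix.mp h2
                have e1 : pvScan12 ('<' :: t) = pvR2 ++ pvScan12 u := by
                  rw [pvScan12_cons, if_neg h1, if_pos h2, ← hu, List.drop_left]
                have hd : ('<' :: t).drop pvP2.length = u := by rw [← hu, List.drop_left]
                rw [e1, pvRep_append pvR3 _ (by decide),
                  ih u (by have := congrArg List.length hu; simp [pvP2] at this; simp at hl; omega),
                  pvScan_cons, if_pos rfl, if_neg h1, if_pos h2, hd]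
              · by_cases h3 : pvP3.isPrefixOf ('<' :: t)
                · obtain ⟨u, hu⟩ := List.isPrefixOf_iff_prefix.mp h3
                  rw [pvP3_eq, List.cons_append] at hu
                  have ht : pvQ3 ++ u = t := by
                    have := congrArg List.tail hu
                    simpa using this
                  subst ht
                  have hlu : u.length ≤ n := by simp at hl; omega
                  have e1 : pvScan12 ('<' :: (pvQ3 ++ u)) = pvP3 ++ pvScan12 u := by
                    rw [pvScan12_cons, if_neg h1, if_neg h2,
                      pvScan12_append u (by decide) (by decide), pvP3_eq, List.cons_append]
                  have hd : ('<' :: (pvQ3 ++ u)).drop pvP3.length = u := by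
                    rw [pvP3_eq, List.length_cons, List.drop_succ_cons, List.drop_left]
                  rw [e1, pvRep_match pvP3 pvR3 (by decide), ih u hlu,
                    pvScan_cons, if_pos rfl, if_neg h1, if_neg h2, if_pos h3, hd]
                · have e1 : pvScan12 ('<' :: t) = '<' :: pvScan12 t := by
                    rw [pvScan12_cons, if_neg h1, if_neg h2]
                  have hg : ¬ pvP3.isPrefixOf ('<' :: pvScan12 t) := by
                    intro hpf
                    obtain ⟨u, hu⟩ := List.isPrefixOf_iff_prefix.mp hpf
                    rw [pvP3_eq, List.cons_append] at hu
                    have hpre : pvQ3 <+: pvScan12 t :=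
                      ⟨u, by have := congrArg List.tail hu; simpa using this⟩
                    have h4 := pvScan12_no_new t _ (by simp [pvQ3]) hpre
                    apply h3
                    rw [List.isPrefixOf_iff_prefix]
                    obtain ⟨v, hv⟩ := h4
                    exact ⟨v, by rw [pvP3_eq, List.cons_append, hv]⟩
                  rw [e1, pvRep_cons, if_neg (by simp [hg]), ih t (by simp at hl; omega),
                    pvScan_cons, if_pos rfl, if_neg h1, if_neg h2, if_neg h3]
          · have hp1 : ¬ pvP1.isPrefixOf (c :: t) := by
              intro h
              obtain ⟨u, hu⟩ := List.isPrefixOf_iff_prefix.mp h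
              rw [pvP1_eq, List.cons_append] at hu
              exact hc (by have := congrArg (fun l => l[0]?) hu; simpa using this.symm)
            have hp2 : ¬ pvP2.isPrefixOf (c :: t) := by
              intro h
              obtain ⟨u, hu⟩ := List.isPrefixOf_iff_prefix.mp h
              rw [pvP2_eq, List.cons_append] at hu
              exact hc (by have := congrArg (fun l => l[0]?) hu; simpa using this.symm)
            have e1 : pvScan12 (c :: t) = c :: pvScan12 t := by
              rw [pvScan12_cons, if_neg hp1, if_neg hp2]
            have hg : ¬ pvP3.isPrefixOf (c :: pvScan12 t) := by
              intro h
              obtain ⟨u, hu⟩ := List.isPrefixOf_iff_prefix.mp h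
              rw [pvP3_eq, List.cons_append] at hu
              exact hc (by have := congrArg (fun l => l[0]?) hu; simpa using this.symm)
            rw [e1, pvRep_cons, if_neg (by simp [hg]), ih t (by simp at hl; omega),
              pvScan_cons, if_neg hc]

-- ===== VERDICT (by name: the statement is the Claim_ definition above) =====
theorem clean_pango_spec : Claim_equal_clean_pango := by
  intro data _
  unfold Spec_clean_pango
  have hA : clean_pango data =
      PySem.Str.replace (PySem.Str.replace (PySem.Str.replace data "<font color=\"" "<span foreground=\"")
        "</font>" "</span>") "<br>" "\n" := rfl
  have hlist : (clean_pango data).toList = pvScan data.toList := by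
    rw [hA, pvStr_replace_toList _ _ _ (by decide), pvStr_replace_toList _ _ _ (by decide),
      pvStr_replace_toList _ _ _ (by decide)]
    rw [show "<font color=\"".toList = pvP1 from rfl, show "<span foreground=\"".toList = pvR1 from rfl,
      show "</font>".toList = pvP2 from rfl, show "</span>".toList = pvR2 from rfl,
      show "<br>".toList = pvP3 from rfl, show "\n".toList = pvR3 from rfl]
    rw [pvFuse12 data.toList.length data.toList (le_refl _),
      pvFuse3 data.toList.length data.toList (le_refl _)]
  calc clean_pango data = String.ofList (clean_pango data).toList := by simp
    _ = String.ofList (pvScan data.toList) := by rw [hlist]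
    _ = clean_pango_alt data := rfl
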